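-- pv_equiv track=rewrite | github.com/dywzju09-blip/cpg_generator_export | tools/ffi_semantics/registry.py | _version_in_range
-- ===== SOURCE A (Python) =====
-- def _parse_version(v: str):
--     parts = []
--     for token in str(v or "").split("."):
--         try:
--             parts.append(int(token))
--         except Exception:
--             parts.append(0)
--     return tuple(parts)
--
-- def _cmp_version(left: str, right: str) -> int:
--     l_t = _parse_version(left)
--     r_t = _parse_version(right)
--     width = max(len(l_t), len(r_t))
--     l_t = l_t + (0,) * (width - len(l_t))
--     r_t = r_t + (0,) * (width - len(r_t))
--     if l_t < r_t:
--         return -1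
--     if l_t > r_t:
--         return 1
--     return 0
--
-- def _version_in_range(version: str, range_expr: str) -> bool:
--     if not range_expr:
--         return True
--     clauses = [item.strip() for item in str(range_expr).split(",") if item.strip()]
--     for clause in clauses:
--         if clause.startswith(">="):
--             if _cmp_version(version, clause[2:]) < 0:
--                 return False
--         elif clause.startswith(">"):
--             if _cmp_version(version, clause[1:]) <= 0:
--                 return False
--         elif clause.startswith("<="):
--             if _cmp_version(version, clause[2:]) > 0:
--                 return False
--         elif clause.startswith("<"):
--             if _cmp_version(version, clause[1:]) >= 0:
--                 return False
--         elif clause.startswith("=="):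
--             if _cmp_version(version, clause[2:]) != 0:
--                 return False
--         else:
--             if _cmp_version(version, clause) != 0:
--                 return False
--     return True
-- ===== SOURCE B (Python) =====
-- # Same semantics, different decomposition: clauses are parsed into (op, bound)
-- # pairs, checked against an operator->allowed-cmp-results table, and version
-- # comparison is a direct recursive walk (implicit zero padding) instead of
-- # pad-then-tuple-compare.
--
-- _ALLOWED = {'>=': (0, 1), '>': (1,), '<=': (-1, 0), '<': (-1,), '==': (0,), '': (0,)}
--
--
-- def _int0(token):
--     try:
--         return int(token)
--     except ValueError:
--         return 0
--
--
-- def _nums(v):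
--     return [_int0(t) for t in str(v or "").split('.')]
--
--
-- def _cmp_nums(l, r):
--     if not l and not r:
--         return 0
--     a = l[0] if l else 0
--     b = r[0] if r else 0
--     if a < b:
--         return -1
--     if a > b:
--         return 1
--     return _cmp_nums(l[1:], r[1:])
--
--
-- def _split_clause(clause):
--     for op in ('>=', '<=', '==', '>', '<'):
--         if clause.startswith(op):
--             return op, clause[len(op):]
--     return '', clause
--
--
-- def _version_in_range(version: str, range_expr: str) -> bool:
--     if not range_expr:
--         return True
--     vnums = _nums(version)
--     ok = True
--     for raw in str(range_expr).split(','):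
--         clause = raw.strip()
--         if clause:
--             op, bound = _split_clause(clause)
--             ok = ok and (_cmp_nums(vnums, _nums(bound)) in _ALLOWED[op])
--     return ok
-- ===== Notes on version B (the rewrite author's own statement) =====
-- stated objective: alternative
-- what changed: Clauses are parsed into (operator, bound) pairs checked against an operator-to-allowed-comparison-results table folded with a boolean accumulator, and the version comparison walks the two component lists recursively with implicit zero padding instead of materialising padded tuples and comparing them twice.
import Mathlib
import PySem

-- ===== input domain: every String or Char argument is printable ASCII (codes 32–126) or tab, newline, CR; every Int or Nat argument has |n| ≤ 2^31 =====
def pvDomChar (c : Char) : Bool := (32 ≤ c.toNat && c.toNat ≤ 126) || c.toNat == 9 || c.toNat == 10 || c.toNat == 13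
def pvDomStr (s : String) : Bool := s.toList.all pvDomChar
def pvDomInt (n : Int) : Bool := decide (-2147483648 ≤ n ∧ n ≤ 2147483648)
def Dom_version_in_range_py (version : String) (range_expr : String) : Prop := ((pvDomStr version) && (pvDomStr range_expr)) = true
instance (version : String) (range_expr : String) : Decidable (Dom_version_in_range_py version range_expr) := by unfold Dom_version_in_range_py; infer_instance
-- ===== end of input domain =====

-- B checks each clause as (operator, bound) against a table of allowed comparison results and
-- compares versions by a recursive walk with implicit zero padding; same return value as A.

-- ===== PORT A =====

-- _parse_version: loop appending int(token) (0 on failure) for each '.'-separated token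
def parseVersionA (v : String) : List Int :=
  ((PySem.Str.split? v ".").getD []).foldl (fun parts token => parts ++ [(PySem.Int.ofStr? token).getD 0]) []

-- Python tuple '<' on int tuples (lexicographic)
def tupLt : List Int → List Int → Bool
  | [], [] => false
  | [], _ :: _ => true
  | _ :: _, [] => false
  | a :: as, b :: bs => if a < b then true else if b < a then false else tupLt as bs

def cmpVersionA (left right : String) : Int :=
  let l_t := parseVersionA left
  let r_t := parseVersionA right
  let width := max l_t.length r_t.length
  let l_p := l_t ++ List.replicate (width - l_t.length) 0
  let r_p := r_t ++ List.replicate (width - r_t.length) 0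
  if tupLt l_p r_p then -1 else if tupLt r_p l_p then 1 else 0

-- the 'for clause in clauses' loop with its early returns
def clausesLoopA (version : String) : List String → Bool
  | [] => true
  | c :: rest =>
    if PySem.Str.startswith c ">=" then
      (if cmpVersionA version (PySem.Str.slice c (some 2) none) < 0 then false
       else clausesLoopA version rest)
    else if PySem.Str.startswith c ">" then
      (if cmpVersionA version (PySem.Str.slice c (some 1) none) ≤ 0 then false
       else clausesLoopA version rest)
    else if PySem.Str.startswith c "<=" then
      (if 0 < cmpVersionA version (PySem.Str.slice c (some 2) none) then false
       else clausesLoopA version rest)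
    else if PySem.Str.startswith c "<" then
      (if 0 ≤ cmpVersionA version (PySem.Str.slice c (some 1) none) then false
       else clausesLoopA version rest)
    else if PySem.Str.startswith c "==" then
      (if cmpVersionA version (PySem.Str.slice c (some 2) none) ≠ 0 then false
       else clausesLoopA version rest)
    else
      (if cmpVersionA version c ≠ 0 then false
       else clausesLoopA version rest)

def version_in_range_py (version : String) (range_expr : String) : Bool :=
  if range_expr = "" then true
  else
    let clauses := (((PySem.Str.split? range_expr ",").getD []).map PySem.Str.strip).filter (fun s => ¬ s = "")
    clausesLoopA version clauses

-- ===== PORT B =====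

def allowedB : PySem.Dict String (List Int) :=
  PySem.Dict.ofList [(">=", [0, 1]), (">", [1]), ("<=", [-1, 0]), ("<", [-1]), ("==", [0]), ("", [0])]

def int0 (token : String) : Int := (PySem.Int.ofStr? token).getD 0

def numsB (v : String) : List Int := ((PySem.Str.split? v ".").getD []).map int0

def cmpNumsB : List Int → List Int → Int
  | [], [] => 0
  | [], b :: bs => if (0 : Int) < b then -1 else if b < 0 then 1 else cmpNumsB [] bs
  | a :: as, [] => if a < 0 then -1 else if 0 < a then 1 else cmpNumsB as []
  | a :: as, b :: bs => if a < b then -1 else if b < a then 1 else cmpNumsB as bs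

-- the loop over the literal operator tuple ('>=', '<=', '==', '>', '<'), unrolled
def splitClauseB (clause : String) : String × String :=
  if PySem.Str.startswith clause ">=" then (">=", PySem.Str.slice clause (some 2) none)
  else if PySem.Str.startswith clause "<=" then ("<=", PySem.Str.slice clause (some 2) none)
  else if PySem.Str.startswith clause "==" then ("==", PySem.Str.slice clause (some 2) none)
  else if PySem.Str.startswith clause ">" then (">", PySem.Str.slice clause (some 1) none)
  else if PySem.Str.startswith clause "<" then ("<", PySem.Str.slice clause (some 1) none)
  else ("", clause)

def version_in_range_py_alt (version : String) (range_expr : String) : Bool :=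
  if range_expr = "" then true
  else
    let vnums := numsB version
    ((PySem.Str.split? range_expr ",").getD []).foldl
      (fun ok raw =>
        let clause := PySem.Str.strip raw
        if clause = "" then ok
        else
          let ob := splitClauseB clause
          ok && ((allowedB.get? ob.1).getD []).contains (cmpNumsB vnums (numsB ob.2)))
      true

-- ===== PRECONDITION & SPEC =====
def Spec_version_in_range_py (version : String) (range_expr : String) (out : Bool) : Prop := out = version_in_range_py_alt version range_expr
instance (version : String) (range_expr : String) (out : Bool) : Decidable (Spec_version_in_range_py version range_expr out) := by unfold Spec_version_in_range_py; infer_instance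

-- ===== CLAIM (what is proved, stated in full; the proofs are below) =====
def Claim_equal_version_in_range_py : Prop := ∀ (version : String) (range_expr : String), Dom_version_in_range_py version range_expr → Spec_version_in_range_py version range_expr (version_in_range_py version range_expr)

-- ===== LEMMAS AND PROOFS =====

-- per-clause check B performs after stripping
def tB (vn : List Int) (c : String) : Bool :=
  ((allowedB.get? (splitClauseB c).1).getD []).contains (cmpNumsB vn (numsB (splitClauseB c).2))

theorem parseA_eq_numsB (v : String) : parseVersionA v = numsB v := by
  simp only [parseVersionA, numsB, PySem.List.foldl_append_singleton_eq_map, List.nil_append]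
  rfl

theorem padCmp_eq (lt rt : List Int) :
    (if tupLt (lt ++ List.replicate (max lt.length rt.length - lt.length) 0)
              (rt ++ List.replicate (max lt.length rt.length - rt.length) 0) then (-1 : Int)
     else if tupLt (rt ++ List.replicate (max lt.length rt.length - rt.length) 0)
                   (lt ++ List.replicate (max lt.length rt.length - lt.length) 0) then 1
     else 0) = cmpNumsB lt rt := by
  induction lt, rt using cmpNumsB.induct <;>
    simp_all [cmpNumsB, tupLt, List.replicate_succ, Nat.succ_max_succ]
  case case4 b bs h1 h2 ih => have hb : b = 0 := le_antisymm h1 h2; subst hb; simpa using ih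
  case case7 a as h1 h2 ih => have ha : a = 0 := le_antisymm h2 h1; subst ha; simpa using ih
  case case10 a as b bs h1 h2 ih => have hab : a = b := le_antisymm h2 h1; subst hab; simpa using ih

theorem cmpA_eq_cmpB (l r : String) : cmpVersionA l r = cmpNumsB (numsB l) (numsB r) := by
  simp only [cmpVersionA, parseA_eq_numsB]
  exact padCmp_eq _ _

theorem cmpB_cases (l r : List Int) : cmpNumsB l r = -1 ∨ cmpNumsB l r = 0 ∨ cmpNumsB l r = 1 := by
  induction l, r using cmpNumsB.induct <;> simp only [cmpNumsB] <;> (try split_ifs) <;> simp_all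

theorem sw_conflict {c x y : String} {a b : Char} {p q : List Char}
    (hx : x.toList = a :: p) (hy : y.toList = b :: q) (hne : b ≠ a)
    (h : PySem.Str.startswith c x = true) : PySem.Str.startswith c y = false := by
  rw [PySem.Str.startswith_eq, PySem.Chars.startswith_iff, hx] at h
  rw [PySem.Str.startswith_eq, ← Bool.not_eq_true, PySem.Chars.startswith_iff, hy]
  rcases h with ⟨t, ht⟩
  intro h2
  rw [← ht, List.cons_append, List.cons_prefix_cons] at h2
  exact hne h2.1

theorem loopA_eq (v : String) (cls : List String) :
    clausesLoopA v cls = cls.all (fun c => tB (numsB v) c) := by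
  induction cls with
  | nil => rfl
  | cons c rest ih =>
    have hge : (allowedB.get? ">=").getD [] = [0, 1] := rfl
    have hgt : (allowedB.get? ">").getD [] = [1] := rfl
    have hle : (allowedB.get? "<=").getD [] = [-1, 0] := rfl
    have hlt : (allowedB.get? "<").getD [] = [-1] := rfl
    have heq : (allowedB.get? "==").getD [] = [0] := rfl
    have hnone : (allowedB.get? "").getD [] = [0] := rfl
    simp only [clausesLoopA, List.all_cons, ih]
    by_cases h1 : PySem.Str.startswith c ">=" = true
    · have hsc : splitClauseB c = (">=", PySem.Str.slice c (some 2) none) := by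
        unfold splitClauseB; rw [h1]; simp
      have hop : (splitClauseB c).1 = ">=" := by rw [hsc]
      have hbd : (splitClauseB c).2 = PySem.Str.slice c (some 2) none := by rw [hsc]
      have h1' : PySem.Chars.startswith c.toList ['>', '='] = true := by simpa using h1
      unfold tB
      rcases cmpB_cases (numsB v) (numsB (PySem.Str.slice c (some 2) none)) with h | h | h <;>
        simp [h1', hop, hbd, cmpA_eq_cmpB, h, hge]
    rw [Bool.not_eq_true] at h1
    by_cases h2 : PySem.Str.startswith c ">" = true
    · have swle : PySem.Str.startswith c "<=" = false :=
        sw_conflict (x := ">") (y := "<=") rfl rfl (by decide) h2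
      have sweq : PySem.Str.startswith c "==" = false :=
        sw_conflict (x := ">") (y := "==") rfl rfl (by decide) h2
      have hsc : splitClauseB c = (">", PySem.Str.slice c (some 1) none) := by
        unfold splitClauseB; rw [h1, swle, sweq, h2]; simp
      have hop : (splitClauseB c).1 = ">" := by rw [hsc]
      have hbd : (splitClauseB c).2 = PySem.Str.slice c (some 1) none := by rw [hsc]
      have h1' : PySem.Chars.startswith c.toList ['>', '='] = false := by simpa using h1
      have h2' : PySem.Chars.startswith c.toList ['>'] = true := by simpa using h2
      unfold tB
      rcases cmpB_cases (numsB v) (numsB (PySem.Str.slice c (some 1) none)) with h | h | h <;>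
        simp [h1', h2', hop, hbd, cmpA_eq_cmpB, h, hgt]
    rw [Bool.not_eq_true] at h2
    by_cases h3 : PySem.Str.startswith c "<=" = true
    · have hsc : splitClauseB c = ("<=", PySem.Str.slice c (some 2) none) := by
        unfold splitClauseB; rw [h1, h3]; simp
      have hop : (splitClauseB c).1 = "<=" := by rw [hsc]
      have hbd : (splitClauseB c).2 = PySem.Str.slice c (some 2) none := by rw [hsc]
      have h1' : PySem.Chars.startswith c.toList ['>', '='] = false := by simpa using h1
      have h2' : PySem.Chars.startswith c.toList ['>'] = false := by simpa using h2
      have h3' : PySem.Chars.startswith c.toList ['<', '='] = true := by simpa using h3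
      unfold tB
      rcases cmpB_cases (numsB v) (numsB (PySem.Str.slice c (some 2) none)) with h | h | h <;>
        simp [h1', h2', h3', hop, hbd, cmpA_eq_cmpB, h, hle]
    rw [Bool.not_eq_true] at h3
    by_cases h4 : PySem.Str.startswith c "<" = true
    · have sweq : PySem.Str.startswith c "==" = false :=
        sw_conflict (x := "<") (y := "==") rfl rfl (by decide) h4
      have hsc : splitClauseB c = ("<", PySem.Str.slice c (some 1) none) := by
        unfold splitClauseB; rw [h1, h3, sweq, h2, h4]; simp
      have hop : (splitClauseB c).1 = "<" := by rw [hsc]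
      have hbd : (splitClauseB c).2 = PySem.Str.slice c (some 1) none := by rw [hsc]
      have h1' : PySem.Chars.startswith c.toList ['>', '='] = false := by simpa using h1
      have h2' : PySem.Chars.startswith c.toList ['>'] = false := by simpa using h2
      have h3' : PySem.Chars.startswith c.toList ['<', '='] = false := by simpa using h3
      have h4' : PySem.Chars.startswith c.toList ['<'] = true := by simpa using h4
      unfold tB
      rcases cmpB_cases (numsB v) (numsB (PySem.Str.slice c (some 1) none)) with h | h | h <;>
        simp [h1', h2', h3', h4', hop, hbd, cmpA_eq_cmpB, h, hlt]
    rw [Bool.not_eq_true] at h4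
    by_cases h5 : PySem.Str.startswith c "==" = true
    · have hsc : splitClauseB c = ("==", PySem.Str.slice c (some 2) none) := by
        unfold splitClauseB; rw [h1, h3, h5]; simp
      have hop : (splitClauseB c).1 = "==" := by rw [hsc]
      have hbd : (splitClauseB c).2 = PySem.Str.slice c (some 2) none := by rw [hsc]
      have h1' : PySem.Chars.startswith c.toList ['>', '='] = false := by simpa using h1
      have h2' : PySem.Chars.startswith c.toList ['>'] = false := by simpa using h2
      have h3' : PySem.Chars.startswith c.toList ['<', '='] = false := by simpa using h3
      have h4' : PySem.Chars.startswith c.toList ['<'] = false := by simpa using h4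
      have h5' : PySem.Chars.startswith c.toList ['=', '='] = true := by simpa using h5
      unfold tB
      rcases cmpB_cases (numsB v) (numsB (PySem.Str.slice c (some 2) none)) with h | h | h <;>
        simp [h1', h2', h3', h4', h5', hop, hbd, cmpA_eq_cmpB, h, heq]
    rw [Bool.not_eq_true] at h5
    have hsc : splitClauseB c = ("", c) := by
      unfold splitClauseB; rw [h1, h3, h5, h2, h4]; simp
    have hop : (splitClauseB c).1 = "" := by rw [hsc]
    have hbd : (splitClauseB c).2 = c := by rw [hsc]
    have h1' : PySem.Chars.startswith c.toList ['>', '='] = false := by simpa using h1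
    have h2' : PySem.Chars.startswith c.toList ['>'] = false := by simpa using h2
    have h3' : PySem.Chars.startswith c.toList ['<', '='] = false := by simpa using h3
    have h4' : PySem.Chars.startswith c.toList ['<'] = false := by simpa using h4
    have h5' : PySem.Chars.startswith c.toList ['=', '='] = false := by simpa using h5
    unfold tB
    rcases cmpB_cases (numsB v) (numsB c) with h | h | h <;>
      simp [h1', h2', h3', h4', h5', hop, hbd, cmpA_eq_cmpB, h, hnone]

theorem foldB_eq (vn : List Int) (l : List String) (acc : Bool) :
    l.foldl (fun ok raw =>
      if PySem.Str.strip raw = "" then ok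
      else ok && ((allowedB.get? (splitClauseB (PySem.Str.strip raw)).1).getD []).contains
             (cmpNumsB vn (numsB (splitClauseB (PySem.Str.strip raw)).2))) acc
    = (acc && ((l.map PySem.Str.strip).filter (fun s => ¬ s = "")).all (fun c => tB vn c)) := by
  induction l generalizing acc with
  | nil => simp
  | cons hd t ihh =>
    by_cases hs : PySem.Str.strip hd = ""
    · simpa [hs] using ihh acc
    · simpa [hs, tB, Bool.and_assoc] using
        ihh (acc && ((allowedB.get? (splitClauseB (PySem.Str.strip hd)).1).getD []).contains
          (cmpNumsB vn (numsB (splitClauseB (PySem.Str.strip hd)).2)))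

-- ===== VERDICT (by name: the statement is the Claim_ definition above) =====
theorem version_in_range_py_spec : Claim_equal_version_in_range_py := by
  intro v r _
  unfold Spec_version_in_range_py
  by_cases hr : r = ""
  · simp [version_in_range_py, version_in_range_py_alt, hr]
  · simp only [version_in_range_py, version_in_range_py_alt, if_neg hr]
    rw [loopA_eq, foldB_eq]
    simp
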